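-- pv_equiv track=rewrite | github.com/libapps/libapps-mirror | libdot/third_party/wcwidth/ranges.py | js_dumps
-- ===== SOURCE A (Python) =====
-- def js_dumps(ranges):
--     """Dump a binary search table |ranges| as a Javascript object.
--
--     This is currently ad-hoc code but could easily use the json
--     module.  We do this to have better control over output format.
--     """
--     ret = '[\n'
--     i = 0
--     for r in ranges:
--         if i == 0:
--             # Indent this new line.
--             ret += '  '
--         else:
--             # Add a space after the previous element.
--             ret += ' '
--         ret += '[%#06x, %#06x],' % (r[0], r[1])
--         i += 1
--         if i == 3:
--             ret += '\n'
--             i = 0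
--     if i:
--         ret += '\n'
--     ret += '];\n'
--
--     return ret
-- ===== SOURCE B (Python) =====
-- def js_dumps(ranges):
--     """Dump a binary search table |ranges| as a Javascript object."""
--     cells = ['[%#06x, %#06x],' % (r[0], r[1]) for r in ranges]
--     lines = []
--     while cells:
--         lines.append('  ' + ' '.join(cells[:3]) + '\n')
--         cells = cells[3:]
--     return '[\n' + ''.join(lines) + '];\n'
-- ===== Notes on version B (the rewrite author's own statement) =====
-- stated objective: simpler
-- what changed: The running counter with its per-element if/else and end-of-loop fixups is replaced by formatting all cells once, then chunking them into groups of three and assembling each line with join.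
import Mathlib
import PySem

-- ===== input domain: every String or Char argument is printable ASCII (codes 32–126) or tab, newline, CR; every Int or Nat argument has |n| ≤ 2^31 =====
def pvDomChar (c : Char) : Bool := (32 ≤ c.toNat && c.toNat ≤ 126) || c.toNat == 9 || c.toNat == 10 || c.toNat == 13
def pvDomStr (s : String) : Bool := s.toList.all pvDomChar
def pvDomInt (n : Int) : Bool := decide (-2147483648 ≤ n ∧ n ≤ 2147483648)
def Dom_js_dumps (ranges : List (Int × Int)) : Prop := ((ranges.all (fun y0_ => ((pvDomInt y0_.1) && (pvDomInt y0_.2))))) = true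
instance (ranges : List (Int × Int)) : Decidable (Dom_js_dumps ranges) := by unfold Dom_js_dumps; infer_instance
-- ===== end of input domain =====

-- B replaces A's running counter and per-element if/else by formatting all cells once,
-- then chunking them into groups of three joined into lines (objective: simpler).

-- Shared formatting helper: Python's '%#06x' % n (exact for all Int n: '0x'/-'-0x'
-- prefix, lowercase hex digits, zero-padded to a total width of 6 counting sign+prefix).
def hexDigitChar (d : Nat) : Char := if d < 10 then Char.ofNat (48 + d) else Char.ofNat (87 + d)

def hexDigits : Nat → List Char
  | 0 => []
  | n + 1 => hexDigits ((n + 1) / 16) ++ [hexDigitChar ((n + 1) % 16)]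
decreasing_by exact Nat.div_lt_self (Nat.succ_pos n) (by norm_num)

def pad0 (w : Nat) (ds : List Char) : List Char := List.replicate (w - ds.length) '0' ++ ds

def fmtHex6 (n : Int) : String :=
  if n < 0 then "-0x" ++ String.ofList (pad0 3 (hexDigits (-n).toNat))
  else "0x" ++ String.ofList (pad0 4 (hexDigits n.toNat))

-- '[%#06x, %#06x],' % (r[0], r[1])  (the same format expression appears in A and in B)
def fmtPair (r : Int × Int) : String := "[" ++ fmtHex6 r.1 ++ ", " ++ fmtHex6 r.2 ++ "],"

-- ===== PORT A =====
-- loop body of A: state is (ret, i)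
def stepA (st : String × Nat) (r : Int × Int) : String × Nat :=
  let ret := st.1 ++ (if st.2 == 0 then "  " else " ") ++ fmtPair r
  let i := st.2 + 1
  if i == 3 then (ret ++ "\n", 0) else (ret, i)

def js_dumps (ranges : List (Int × Int)) : String :=
  let st := ranges.foldl stepA ("[\n", 0)
  (if st.2 ≠ 0 then st.1 ++ "\n" else st.1) ++ "];\n"

-- ===== PORT B =====
-- B's while loop: take cells[:3] as a line, continue on cells[3:]
def linesOf : List String → List String
  | [] => []
  | c :: t => ("  " ++ PySem.Str.join " " ((c :: t).take 3) ++ "\n") :: linesOf ((c :: t).drop 3)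
termination_by l => l.length
decreasing_by simp

def js_dumps_alt (ranges : List (Int × Int)) : String :=
  let cells := ranges.map fmtPair
  "[\n" ++ PySem.Str.join "" (linesOf cells) ++ "];\n"

-- ===== PRECONDITION & SPEC =====
def Spec_js_dumps (ranges : List (Int × Int)) (out : String) : Prop := out = js_dumps_alt ranges
instance (ranges : List (Int × Int)) (out : String) : Decidable (Spec_js_dumps ranges out) := by unfold Spec_js_dumps; infer_instance

-- ===== CLAIM (what is proved, stated in full; the proofs are below) =====
def Claim_equal_js_dumps : Prop := ∀ (ranges : List (Int × Int)), Dom_js_dumps ranges → Spec_js_dumps ranges (js_dumps ranges)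

-- ===== LEMMAS AND PROOFS =====
theorem join_empty_nil : PySem.Str.join "" ([] : List String) = "" := by
  simp [PySem.Str.join, PySem.Chars.join, List.intercalate]

theorem join_empty_cons (x : String) (xs : List String) :
    PySem.Str.join "" (x :: xs) = x ++ PySem.Str.join "" xs := by
  cases xs <;> simp [PySem.Str.join, PySem.Chars.join, List.intercalate]

theorem join_sp_one (a : String) : PySem.Str.join " " [a] = a := by
  simp [PySem.Str.join, PySem.Chars.join, List.intercalate]

theorem join_sp_two (a b : String) : PySem.Str.join " " [a, b] = a ++ " " ++ b := by
  simp [PySem.Str.join, PySem.Chars.join, List.intercalate]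
  apply String.toList_injective
  simp [String.toList_append]

theorem join_sp_three (a b c : String) : PySem.Str.join " " [a, b, c] = a ++ " " ++ b ++ " " ++ c := by
  simp [PySem.Str.join, PySem.Chars.join, List.intercalate]
  apply String.toList_injective
  simp [String.toList_append]

-- Main invariant: running A's loop from (s, 0) and applying A's end-of-loop fixup
-- yields s followed by B's joined lines.
theorem key : (l : List (Int × Int)) → ∀ s : String,
    (if (l.foldl stepA (s, 0)).2 ≠ 0 then (l.foldl stepA (s, 0)).1 ++ "\n"
     else (l.foldl stepA (s, 0)).1)
      = s ++ PySem.Str.join "" (linesOf (l.map fmtPair))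
  | [] => by
    intro s
    simp [linesOf, join_empty_nil]
  | [a] => by
    intro s
    simp [stepA, linesOf, join_empty_cons, join_empty_nil, join_sp_one, String.append_assoc]
  | [a, b] => by
    intro s
    simp [stepA, linesOf, join_empty_cons, join_empty_nil, join_sp_two, String.append_assoc]
  | a :: b :: c :: t => by
    intro s
    have ih := key t (s ++ "  " ++ fmtPair a ++ " " ++ fmtPair b ++ " " ++ fmtPair c ++ "\n")
    simp only [List.foldl, stepA] at ih ⊢
    norm_num at ih ⊢
    rw [ih]
    simp [linesOf, join_empty_cons, join_sp_three, String.append_assoc]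
termination_by l => l.length

-- ===== VERDICT (by name: the statement is the Claim_ definition above) =====
theorem js_dumps_spec : Claim_equal_js_dumps := by
  intro ranges _
  unfold Spec_js_dumps js_dumps js_dumps_alt
  simp only []
  rw [key ranges "[\n"]
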